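-- pv_equiv track=rewrite | github.com/juandelima/Password-validation---Python | password_validation.py | cek_kata
-- ===== SOURCE A (Python) =====
-- def create_lists(kata):
--    new_arr = []
--    for kata1 in kata:
--       for huruf in kata1:
--          new_arr.append(huruf)
--    return new_arr
--
-- def sorting_kata(password):
--    arr = create_lists(password)
--    for index in range(1, len(password)):
--       current_word = arr[index]
--       index_kata = index
--       while index_kata > 0 and arr[index_kata - 1] > current_word:
--          arr[index_kata] = arr[index_kata - 1]
--          index_kata -= 1
--       arr[index_kata] = current_word
--    return arr
--
-- def pencarian_huruf(password, cari): #teknik rekursif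
--    arr = sorting_kata(password)
--    if len(arr) == 0:
--       return False
--    else:
--       split_word = len(arr) // 2
--       if arr[split_word ] == cari:
--          return True
--       else:
--          if cari < arr[split_word]:
--             return pencarian_huruf(arr[:split_word], cari)
--          else:
--             return pencarian_huruf(arr[split_word + 1:], cari)
--
-- def cek_kata(password):
--    words = "ABCDEFGHIJKLMNOPQRSTUVWXYZabcdefghijklmnopqrstuvwxyz "
--    lists_wrd = create_lists(words)
--    check = False
--    for word in range(len(lists_wrd)):
--       if pencarian_huruf(password, lists_wrd[word]) != check:
--          check = True
--    return check
-- ===== SOURCE B (Python) =====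
-- def cek_kata(password):
--    allowed = set("ABCDEFGHIJKLMNOPQRSTUVWXYZabcdefghijklmnopqrstuvwxyz ")
--    for kata1 in password:
--       for huruf in kata1:
--          if huruf in allowed:
--             return True
--    return False
-- ===== Notes on version B (the rewrite author's own statement) =====
-- stated objective: faster
-- what changed: Replaced A's per-candidate insertion sort + recursive binary search over all 53 allowed characters by one linear scan of the password against a precomputed allowed set with early exit.
import Mathlib
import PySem

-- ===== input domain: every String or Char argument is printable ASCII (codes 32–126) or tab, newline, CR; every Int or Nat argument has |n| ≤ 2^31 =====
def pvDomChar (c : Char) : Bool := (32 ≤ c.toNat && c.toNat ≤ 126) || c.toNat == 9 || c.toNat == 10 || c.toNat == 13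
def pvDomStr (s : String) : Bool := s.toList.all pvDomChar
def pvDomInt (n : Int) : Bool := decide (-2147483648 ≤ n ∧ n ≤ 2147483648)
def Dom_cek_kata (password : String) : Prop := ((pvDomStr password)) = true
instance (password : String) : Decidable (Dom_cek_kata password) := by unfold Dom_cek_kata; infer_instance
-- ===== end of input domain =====

-- B replaces A's 53 binary searches (each re-running an insertion sort) by one linear scan of the
-- password against a precomputed allowed set with early exit: faster, and structurally different.

-- ===== PORT A =====
-- create_lists: flattens; on strings / lists of single chars this appends each char
def create_lists (kata : List Char) : List Char :=
  kata.foldl (fun new_arr huruf => new_arr ++ [huruf]) []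

-- the inner 'while index_kata > 0 and arr[index_kata-1] > current_word' loop of sorting_kata
def innerWhile (arr : List Char) (current_word : Char) (index_kata : Nat) : List Char × Nat :=
  if h : 0 < index_kata ∧ current_word < arr.getD (index_kata - 1) default then
    innerWhile (arr.set index_kata (arr.getD (index_kata - 1) default)) current_word (index_kata - 1)
  else (arr, index_kata)
termination_by index_kata
decreasing_by omega

-- one iteration of sorting_kata's for-loop
def sortStep (arr : List Char) (index : Nat) : List Char :=
  let current_word := arr.getD index default
  let r := innerWhile arr current_word index
  r.1.set r.2 current_word

def sorting_kata (password : List Char) : List Char :=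
  (List.range' 1 (password.length - 1)).foldl sortStep (create_lists password)

-- length lemmas needed by pencarian_huruf's termination (cited in decreasing_by)
theorem innerWhile_length (j : Nat) : ∀ (arr : List Char) (c : Char),
    ((innerWhile arr c j).1).length = arr.length := by
  induction j using Nat.strong_induction_on with
  | _ j ih =>
    intro arr c
    rw [innerWhile]
    split
    · next h => rw [ih (j-1) (by omega)]; simp
    · rfl

theorem sortStep_length (arr : List Char) (i : Nat) : (sortStep arr i).length = arr.length := by
  simp [sortStep, innerWhile_length]

theorem foldl_sortStep_length (is : List Nat) : ∀ arr : List Char,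
    (is.foldl sortStep arr).length = arr.length := by
  induction is with
  | nil => intro arr; rfl
  | cons i is ih => intro arr; simp [List.foldl_cons, ih, sortStep_length]

theorem create_lists_eq (l : List Char) : create_lists l = l := by
  have h : ∀ (l acc : List Char), l.foldl (fun a c => a ++ [c]) acc = acc ++ l := by
    intro l; induction l with
    | nil => simp
    | cons x xs ih => intro acc; simp [List.foldl_cons, ih]
  simpa [create_lists] using h l []

theorem sorting_length (l : List Char) : (sorting_kata l).length = l.length := by
  simp [sorting_kata, foldl_sortStep_length, create_lists_eq]

-- Python binds arr = sorting_kata(password) once; written inline here (same value) so the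
-- termination measure can see it
def pencarian_huruf (password : List Char) (cari : Char) : Bool :=
  if (sorting_kata password).length = 0 then false
  else
    if (sorting_kata password).getD ((sorting_kata password).length / 2) default == cari then true
    else if cari < (sorting_kata password).getD ((sorting_kata password).length / 2) default then
      pencarian_huruf ((sorting_kata password).take ((sorting_kata password).length / 2)) cari
    else
      pencarian_huruf ((sorting_kata password).drop ((sorting_kata password).length / 2 + 1)) cari
termination_by password.length
decreasing_by
  · simp only [List.length_take, sorting_length] at *
    have := Nat.div_lt_self (show 0 < password.length by omega) (show (1:Nat) < 2 by omega)
    omega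
  · simp only [List.length_drop, sorting_length] at *
    have := Nat.div_lt_self (show 0 < password.length by omega) (show (1:Nat) < 2 by omega)
    omega

def cek_kata (password : String) : Bool :=
  let words := "ABCDEFGHIJKLMNOPQRSTUVWXYZabcdefghijklmnopqrstuvwxyz "
  let lists_wrd := create_lists words.toList
  (List.range lists_wrd.length).foldl
    (fun check word =>
      if pencarian_huruf password.toList (lists_wrd.getD word default) != check then true else check)
    false

-- ===== PORT B =====
-- Source B's inner 'for huruf in kata1' over a single character yields that character itself,
-- so the double loop over a string is a single scan with early exit (List.any).
def cek_kata_alt (password : String) : Bool :=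
  let allowed : PySem.Set Char :=
    PySem.Set.ofList "ABCDEFGHIJKLMNOPQRSTUVWXYZabcdefghijklmnopqrstuvwxyz ".toList
  password.toList.any (fun huruf => PySem.Set.contains allowed huruf)

-- ===== PRECONDITION & SPEC =====
def Spec_cek_kata (password : String) (out : Bool) : Prop := out = cek_kata_alt password
instance (password : String) (out : Bool) : Decidable (Spec_cek_kata password out) := by unfold Spec_cek_kata; infer_instance

-- ===== CLAIM (what is proved, stated in full; the proofs are below) =====
def Claim_equal_cek_kata : Prop := ∀ (password : String), Dom_cek_kata password → Spec_cek_kata password (cek_kata password)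

-- ===== LEMMAS AND PROOFS =====

-- list-model of the insertion the inner while-loop performs: insert c after all elements ≤ c
def myInsert (c : Char) : List Char → List Char
  | [] => [c]
  | x :: xs => if x ≤ c then x :: myInsert c xs else c :: x :: xs

theorem myInsert_append_gt (c a : Char) (h : c < a) : ∀ P : List Char,
    myInsert c (P ++ [a]) = myInsert c P ++ [a] := by
  intro P; induction P with
  | nil => simp [myInsert, not_le_of_gt h]
  | cons x xs ih => by_cases hx : x ≤ c <;> simp [myInsert, hx, ih]

theorem myInsert_all_le (c : Char) (P : List Char) (h : ∀ x ∈ P, x ≤ c) :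
    myInsert c P = P ++ [c] := by
  induction P with
  | nil => rfl
  | cons x xs ih =>
      simp only [myInsert, h x (by simp), if_true]
      rw [ih (fun y hy => h y (by simp [hy]))]; rfl

theorem myInsert_perm (c : Char) (P : List Char) : (myInsert c P).Perm (c :: P) := by
  induction P with
  | nil => rfl
  | cons x xs ih =>
      by_cases hx : x ≤ c
      · simp only [myInsert, hx, if_true]
        exact (ih.cons x).trans (List.Perm.swap c x xs)
      · simp [myInsert, hx]

theorem myInsert_sorted (c : Char) (P : List Char) (h : P.Pairwise (· ≤ ·)) :
    (myInsert c P).Pairwise (· ≤ ·) := by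
  induction P with
  | nil => simp [myInsert]
  | cons x xs ih =>
      rcases List.pairwise_cons.mp h with ⟨hx, hxs⟩
      by_cases hxc : x ≤ c
      · rw [show myInsert c (x :: xs) = x :: myInsert c xs from by simp [myInsert, hxc]]
        refine List.pairwise_cons.mpr ⟨?_, ih hxs⟩
        intro y hy
        rcases List.mem_cons.mp ((myInsert_perm c xs).mem_iff.mp hy) with rfl | hy
        · exact hxc
        · exact hx y hy
      · rw [show myInsert c (x :: xs) = c :: x :: xs from by simp [myInsert, hxc]]
        refine List.pairwise_cons.mpr ⟨?_, h⟩
        intro y hy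
        rcases List.mem_cons.mp hy with rfl | hy
        · exact le_of_lt (lt_of_not_ge hxc)
        · exact le_trans (le_of_lt (lt_of_not_ge hxc)) (hx y hy)

theorem iw_main (cur : Char) (P : List Char) (hP : P.Pairwise (· ≤ ·)) (z : Char) (S : List Char) :
    (innerWhile (P ++ z :: S) cur P.length).1.set (innerWhile (P ++ z :: S) cur P.length).2 cur
      = myInsert cur P ++ S := by
  induction P using List.reverseRecOn generalizing z S with
  | nil => rw [innerWhile]; simp [myInsert]
  | append_singleton P' a ih =>
    have hP' : P'.Pairwise (· ≤ ·) := hP.sublist (List.sublist_append_left P' [a])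
    have hsplit : (P' ++ [a]) ++ z :: S = P' ++ a :: z :: S := by simp
    have hlen : (P' ++ [a]).length = P'.length + 1 := by simp
    have hget : (P' ++ a :: z :: S).getD (P'.length + 1 - 1) default = a := by
      simp [List.getD]
    by_cases hc : cur < a
    · rw [innerWhile]
      rw [dif_pos (by rw [hsplit, hlen]; exact ⟨Nat.succ_pos _, by rw [hget]; exact hc⟩)]
      have hset : ((P' ++ [a]) ++ z :: S).set ((P' ++ [a]).length)
            (((P' ++ [a]) ++ z :: S).getD ((P' ++ [a]).length - 1) default)
          = P' ++ a :: a :: S := by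
        rw [hsplit, hlen, hget]
        rw [show P' ++ a :: z :: S = (P' ++ [a]) ++ z :: S from by simp]
        rw [List.set_append_right _ _ (by simp)]
        simp
      rw [hset, hlen, Nat.add_sub_cancel]
      rw [show P' ++ a :: a :: S = P' ++ a :: (a :: S) from rfl]
      rw [ih hP' a (a :: S)]
      rw [myInsert_append_gt cur a hc]
      simp
    · rw [innerWhile]
      rw [dif_neg (by rw [hsplit, hlen]; intro hcon; exact hc (by rw [hget] at hcon; exact hcon.2))]
      have hall : ∀ x ∈ P' ++ [a], x ≤ cur := by
        intro x hx
        have ha : a ≤ cur := not_lt.mp hc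
        rcases List.mem_append.mp hx with hx | hx
        · have : x ≤ a := by
            have := List.pairwise_append.mp (by simpa using hP)
            exact this.2.2 x hx a (by simp)
          exact le_trans this ha
        · simp at hx; subst hx; exact ha
      rw [myInsert_all_le cur _ hall]
      rw [hsplit, hlen]
      rw [show P' ++ a :: z :: S = (P' ++ [a]) ++ z :: S from by simp]
      rw [List.set_append_right _ _ (by simp)]
      simp

-- left-to-right insertion sort on lists: the functional model of sorting_kata
def sortL (l : List Char) : List Char := l.foldl (fun acc c => myInsert c acc) []

theorem sortL_perm_aux (l : List Char) : ∀ acc : List Char,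
    (l.foldl (fun acc c => myInsert c acc) acc).Perm (acc ++ l) := by
  induction l with
  | nil => intro acc; simp
  | cons c l' ih =>
      intro acc
      refine ((ih (myInsert c acc)).trans ?_)
      refine (((myInsert_perm c acc).append_right l').trans ?_)
      exact List.perm_middle.symm

theorem sortL_perm (l : List Char) : (sortL l).Perm l := by
  simpa using sortL_perm_aux l []

theorem sortL_length (l : List Char) : (sortL l).length = l.length :=
  (sortL_perm l).length_eq

theorem sortL_sorted_aux (l : List Char) : ∀ acc : List Char, acc.Pairwise (· ≤ ·) →
    (l.foldl (fun acc c => myInsert c acc) acc).Pairwise (· ≤ ·) := by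
  induction l with
  | nil => intro acc h; exact h
  | cons c l' ih => intro acc h; exact ih _ (myInsert_sorted c acc h)

theorem sortL_sorted (l : List Char) : (sortL l).Pairwise (· ≤ ·) :=
  sortL_sorted_aux l [] (by simp)

theorem sortL_append (l : List Char) (c : Char) : sortL (l ++ [c]) = myInsert c (sortL l) := by
  simp [sortL, List.foldl_append]

theorem iw_main' (cur : Char) (P : List Char) (hP : P.Pairwise (· ≤ ·)) (z : Char) (S : List Char)
    (j : Nat) (hj : j = P.length) :
    (innerWhile (P ++ z :: S) cur j).1.set (innerWhile (P ++ z :: S) cur j).2 cur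
      = myInsert cur P ++ S := by
  subst hj; exact iw_main cur P hP z S

theorem sort_aux (l : List Char) : ∀ (k i : Nat), 0 < i → i + k = l.length →
    (List.range' i k).foldl sortStep (sortL (l.take i) ++ l.drop i) = sortL l := by
  intro k
  induction k with
  | zero =>
      intro i hi hik
      have : i = l.length := by omega
      subst this
      simp [List.take_length, List.drop_length]
  | succ k ih =>
      intro i hi hik
      have hil : i < l.length := by omega
      have hdrop : l.drop i = l[i] :: l.drop (i + 1) := List.drop_eq_getElem_cons hil
      have hlenP : (sortL (l.take i)).length = i := by
        rw [sortL_length, List.length_take]; omega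
      have hgetD : (sortL (l.take i) ++ l.drop i).getD i default = l[i] := by
        rw [hdrop, List.getD, List.getElem?_append_right (by omega), hlenP]
        simp [List.getElem?_eq_getElem hil]
      have htake : l.take (i + 1) = l.take i ++ [l[i]] := by
        rw [List.take_add_one, List.getElem?_eq_getElem hil]
        rfl
      have hstep : sortStep (sortL (l.take i) ++ l.drop i) i
          = sortL (l.take (i + 1)) ++ l.drop (i + 1) := by
        unfold sortStep
        rw [hgetD, hdrop]
        rw [iw_main' l[i] (sortL (l.take i)) (sortL_sorted _) l[i] (l.drop (i + 1)) i hlenP.symm]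
        rw [htake, sortL_append]
      rw [List.range'_succ, List.foldl_cons, hstep]
      exact ih (i + 1) (by omega) (by omega)

theorem sorting_eq (l : List Char) : sorting_kata l = sortL l := by
  cases l with
  | nil => rfl
  | cons c l' =>
      unfold sorting_kata
      rw [create_lists_eq]
      have h2 := sort_aux (c :: l') ((c :: l').length - 1) 1 (by omega) (by simp; omega)
      rw [← h2]
      congr 1

theorem pencarian_eq_aux : ∀ (n : Nat) (l : List Char), l.length = n → ∀ c : Char,
    pencarian_huruf l c = decide (c ∈ l) := by
  intro n
  induction n using Nat.strong_induction_on with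
  | _ n ih =>
    intro l hl c
    rw [pencarian_huruf]
    have hperm : (sorting_kata l).Perm l := (sorting_eq l) ▸ sortL_perm l
    have hsorted : (sorting_kata l).Pairwise (· ≤ ·) := (sorting_eq l) ▸ sortL_sorted l
    have hlen : (sorting_kata l).length = l.length := hperm.length_eq
    by_cases h0 : (sorting_kata l).length = 0
    · rw [if_pos h0]
      have : l = [] := List.eq_nil_of_length_eq_zero (by omega)
      subst this; simp
    · rw [if_neg h0]
      set arr := sorting_kata l with harr
      set m := arr.length / 2 with hmdef
      have hm : m < arr.length := Nat.div_lt_self (by omega) (by omega)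
      have hgd : arr.getD m default = arr[m] := List.getD_eq_getElem _ _ hm
      have hsplit : arr.take m ++ arr.drop m = arr := List.take_append_drop m arr
      have hdrop : arr.drop m = arr[m] :: arr.drop (m + 1) := List.drop_eq_getElem_cons hm
      have hdropge : ∀ y ∈ arr.drop m, arr[m] ≤ y := by
        have hp : (arr.drop m).Pairwise (· ≤ ·) := hsorted.sublist (List.drop_sublist m arr)
        rw [hdrop] at hp
        intro y hy
        rw [hdrop] at hy
        rcases List.mem_cons.mp hy with rfl | hy
        · exact le_refl _
        · exact (List.pairwise_cons.mp hp).1 y hy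
      have htakele : ∀ x ∈ arr.take (m + 1), x ≤ arr[m] := by
        have htk : arr.take (m + 1) = arr.take m ++ [arr[m]] := by
          rw [List.take_add_one, List.getElem?_eq_getElem hm]; rfl
        have hp : (arr.take (m + 1)).Pairwise (· ≤ ·) :=
          hsorted.sublist (List.take_sublist (m + 1) arr)
        rw [htk] at hp
        intro x hx
        rw [htk] at hx
        rcases List.mem_append.mp hx with hx | hx
        · exact (List.pairwise_append.mp hp).2.2 x hx arr[m] (by simp)
        · simp at hx; subst hx; exact le_refl _
      by_cases heq : arr[m] = c
      · rw [if_pos (by rw [hgd, heq]; simp)]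
        have : c ∈ l := hperm.mem_iff.mp (heq ▸ List.getElem_mem hm)
        simp [this]
      · rw [if_neg (by rw [hgd]; simpa using heq)]
        by_cases hlt : c < arr[m]
        · rw [if_pos (by rw [hgd]; exact hlt)]
          have hlt' : (arr.take m).length < n := by
            rw [List.length_take]; omega
          rw [ih _ hlt' (arr.take m) rfl c]
          refine decide_eq_decide.mpr ?_
          constructor
          · intro hc
            exact hperm.mem_iff.mp ((List.take_sublist m arr).subset hc)
          · intro hc
            have hc' : c ∈ arr := hperm.mem_iff.mpr hc
            rw [← hsplit] at hc'
            rcases List.mem_append.mp hc' with h | h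
            · exact h
            · exact absurd (hdropge c h) (not_le.mpr hlt)
        · rw [if_neg (by rw [hgd]; exact hlt)]
          have hgt : arr[m] < c := lt_of_le_of_ne (not_lt.mp hlt) heq
          have hlt' : (arr.drop (m + 1)).length < n := by
            rw [List.length_drop]; omega
          rw [ih _ hlt' (arr.drop (m + 1)) rfl c]
          refine decide_eq_decide.mpr ?_
          constructor
          · intro hc
            exact hperm.mem_iff.mp ((List.drop_sublist (m + 1) arr).subset hc)
          · intro hc
            have hc' : c ∈ arr := hperm.mem_iff.mpr hc
            rw [← List.take_append_drop (m + 1) arr] at hc'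
            rcases List.mem_append.mp hc' with h | h
            · exact absurd (htakele c h) (not_le.mpr hgt)
            · exact h

theorem pencarian_eq (l : List Char) (c : Char) : pencarian_huruf l c = decide (c ∈ l) :=
  pencarian_eq_aux l.length l rfl c

theorem fold_check (f : Nat → Bool) : ∀ (ws : List Nat) (b : Bool),
    ws.foldl (fun check w => if f w != check then true else check) b = (b || ws.any f) := by
  intro ws
  induction ws with
  | nil => intro b; simp
  | cons w ws ih =>
      intro b
      rw [List.foldl_cons, ih]
      cases b <;> cases hf : f w <;> simp [hf]

theorem range_any (l : List Char) (p : Char → Bool) :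
    (List.range l.length).any (fun i => p (l.getD i default)) = l.any p := by
  rw [Bool.eq_iff_iff]
  simp only [List.any_eq_true, List.mem_range]
  constructor
  · rintro ⟨i, hi, hp⟩
    exact ⟨l[i], List.getElem_mem hi, by rwa [List.getD_eq_getElem _ _ hi] at hp⟩
  · rintro ⟨x, hx, hp⟩
    rcases List.mem_iff_getElem.mp hx with ⟨i, hi, rfl⟩
    exact ⟨i, hi, by rwa [List.getD_eq_getElem _ _ hi]⟩

theorem any_mem_comm (xs ys : List Char) :
    xs.any (fun c => decide (c ∈ ys)) = ys.any (fun c => decide (c ∈ xs)) := by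
  rw [Bool.eq_iff_iff]
  simp only [List.any_eq_true, decide_eq_true_eq]
  exact ⟨fun ⟨x, h1, h2⟩ => ⟨x, h2, h1⟩, fun ⟨x, h1, h2⟩ => ⟨x, h2, h1⟩⟩

theorem cek_kata_spec_aux (password : String) : cek_kata password = cek_kata_alt password := by
  simp only [cek_kata, cek_kata_alt, create_lists_eq]
  rw [fold_check, Bool.false_or]
  rw [show (fun word => pencarian_huruf password.toList (("ABCDEFGHIJKLMNOPQRSTUVWXYZabcdefghijklmnopqrstuvwxyz ").toList.getD word default))
        = (fun word => decide ((("ABCDEFGHIJKLMNOPQRSTUVWXYZabcdefghijklmnopqrstuvwxyz ").toList.getD word default) ∈ password.toList)) from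
      funext fun w => pencarian_eq _ _]
  rw [range_any _ (fun ch => decide (ch ∈ password.toList))]
  rw [any_mem_comm]
  rw [show (fun huruf : Char => PySem.Set.contains (PySem.Set.ofList ("ABCDEFGHIJKLMNOPQRSTUVWXYZabcdefghijklmnopqrstuvwxyz ").toList) huruf)
        = (fun c : Char => decide (c ∈ ("ABCDEFGHIJKLMNOPQRSTUVWXYZabcdefghijklmnopqrstuvwxyz ").toList)) from
      funext fun c => by rw [Bool.eq_iff_iff]; simp [PySem.Set.mem_ofList]]

-- ===== VERDICT (by name: the statement is the Claim_ definition above) =====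
theorem cek_kata_spec : Claim_equal_cek_kata := by
  intro password _
  unfold Spec_cek_kata
  exact cek_kata_spec_aux password
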